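-- pv_equiv track=rewrite | github.com/Twiggecode/Integer-Sequences | Sylvester Sequence/SylvesterSequence.py | seq
-- ===== SOURCE A (Python) =====
-- def seq(n):
--         pdt = 1
--         ans = 2
--         N = 1000000007
--         for i in range(1,n+1):
--                 ans = ((pdt % N) * (ans % N)) % N
--                 pdt = ans
--                 ans = (ans + 1) % N
--         return ans
-- ===== SOURCE B (Python) =====
-- def seq(n):
--     N = 1000000007
--     pos = {2: 0}
--     a = 2
--     k = 0
--     while k < n:
--         a = (a * a - a + 1) % N
--         k += 1
--         if a in pos:
--             for _ in range((n - k) % (k - pos[a])):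
--                 a = (a * a - a + 1) % N
--             return a
--         pos[a] = k
--     return a
-- ===== Notes on version B (the rewrite author's own statement) =====
-- stated objective: faster
-- what changed: B memoizes every term's first index in a dict and detects when the iteration modulo the prime enters a cycle; on a repeat it reduces the remaining step count modulo the cycle length and finishes with only the reduced number of steps, instead of A's unconditional n-step product-accumulator loop.
import Mathlib
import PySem

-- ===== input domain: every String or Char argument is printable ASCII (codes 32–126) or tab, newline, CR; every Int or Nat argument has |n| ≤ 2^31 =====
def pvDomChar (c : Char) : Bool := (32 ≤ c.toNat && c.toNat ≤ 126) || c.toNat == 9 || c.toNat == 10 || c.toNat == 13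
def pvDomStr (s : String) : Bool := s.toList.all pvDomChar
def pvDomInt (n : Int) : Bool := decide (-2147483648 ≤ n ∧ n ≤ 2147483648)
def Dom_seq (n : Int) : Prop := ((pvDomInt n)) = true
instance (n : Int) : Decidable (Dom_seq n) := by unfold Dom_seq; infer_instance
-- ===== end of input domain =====

-- B replaces A's unconditional n-step product-accumulator loop by a cycle-detecting
-- iteration: it memoizes each term's first index in a dict and, on a repeat, reduces the
-- remaining steps modulo the cycle length (measured faster for large n).

-- ===== PORT A =====
-- loop body of A: state (pdt, ans); the loop index is unused
def seqStep (s : Int × Int) (_i : Int) : Int × Int :=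
  let ans := PySem.Int.mod (PySem.Int.mod s.1 1000000007 * PySem.Int.mod s.2 1000000007) 1000000007
  (ans, PySem.Int.mod (ans + 1) 1000000007)

def seq (n : Int) : Int :=
  ((PySem.List.pyRange 1 (n + 1) 1).foldl seqStep (1, 2)).2

-- ===== PORT B =====
-- B's per-term update: a = (a*a - a + 1) % N
def sylStep (a : Int) : Int := PySem.Int.mod (a * a - a + 1) 1000000007

-- B's inner 'for _ in range(m)' finishing loop after the cycle jump
def sylJump : Nat → Int → Int
  | 0, a => a
  | m + 1, a => sylJump m (sylStep a)

-- B's main 'while k < n' loop; rem is the remaining iteration count n - k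
def seqAltGo (n : Int) : Nat → Int → Int → PySem.Dict Int Int → Int
  | 0, a, _, _ => a
  | rem + 1, a, k, pos =>
    let a' := sylStep a
    let k' := k + 1
    match PySem.Dict.get? pos a' with
    | some i => sylJump (PySem.Int.mod (n - k') (k' - i)).toNat a'
    | none => seqAltGo n rem a' k' (PySem.Dict.insert pos a' k')

def seq_alt (n : Int) : Int :=
  seqAltGo n n.toNat 2 0 (PySem.Dict.insert PySem.Dict.empty 2 0)

-- ===== PRECONDITION & SPEC =====
def Spec_seq (n : Int) (out : Int) : Prop := out = seq_alt n
instance (n : Int) (out : Int) : Decidable (Spec_seq n out) := by unfold Spec_seq; infer_instance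

-- ===== CLAIM (what is proved, stated in full; the proofs are below) =====
def Claim_equal_seq : Prop := ∀ (n : Int), Dom_seq n → Spec_seq n (seq n)

-- ===== LEMMAS AND PROOFS =====

-- ---- A-side: A's loop computes iterates of the quadratic map sylStep ----

-- One step: from A-state (p, (p+1) % N) with 0 ≤ p < N, the quadratic map produces
-- exactly A's next ans component, and the state shape/bounds are preserved.
lemma key_step (p : Int) (h0 : 0 ≤ p) (h1 : p < 1000000007) (x : Int) :
    sylStep (PySem.Int.mod (p + 1) 1000000007)
      = (seqStep (p, PySem.Int.mod (p + 1) 1000000007) x).2 ∧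
    (seqStep (p, PySem.Int.mod (p + 1) 1000000007) x)
      = ((seqStep (p, PySem.Int.mod (p + 1) 1000000007) x).1,
         PySem.Int.mod ((seqStep (p, PySem.Int.mod (p + 1) 1000000007) x).1 + 1) 1000000007) ∧
    0 ≤ (seqStep (p, PySem.Int.mod (p + 1) 1000000007) x).1 ∧
    (seqStep (p, PySem.Int.mod (p + 1) 1000000007) x).1 < 1000000007 := by
  have hN : (0 : Int) < 1000000007 := by norm_num
  simp only [seqStep, sylStep, PySem.Int.mod_eq_emod_of_pos hN]
  have hp : p % 1000000007 = p := Int.emod_eq_of_lt h0 h1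
  have hmm : ((p + 1) % 1000000007) % 1000000007 = (p + 1) % 1000000007 :=
    Int.emod_emod_of_dvd _ dvd_rfl
  rw [hp, hmm]
  refine ⟨?_, by trivial, Int.emod_nonneg _ (by norm_num), Int.emod_lt_of_pos _ hN⟩
  set N : Int := 1000000007 with hNdef
  set a : Int := (p + 1) % N with hadef
  have hm : a ≡ p + 1 [ZMOD N] := hmm
  have h5 : a * a - a + 1 ≡ (p + 1) * (p + 1) - (p + 1) + 1 [ZMOD N] :=
    ((hm.mul hm).sub hm).add_right 1
  have e : (p + 1) * (p + 1) - (p + 1) + 1 = p * (p + 1) + 1 := by ring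
  have h4 : p * a + 1 ≡ p * (p + 1) + 1 [ZMOD N] := ((Int.ModEq.refl p).mul hm).add_right 1
  have h3 : a * a - a + 1 ≡ p * a + 1 [ZMOD N] :=
    (h5.trans (e ▸ Int.ModEq.refl _)).trans h4.symm
  have h2 : (p * a) % N + 1 ≡ p * a + 1 [ZMOD N] :=
    Int.ModEq.add_right 1 (Int.emod_emod_of_dvd _ dvd_rfl)
  exact h3.trans h2.symm

-- Folding A's loop body over a list of length k from a well-shaped state yields the
-- k-th iterate of the quadratic map.
lemma main_inv (k : Nat) : ∀ (l1 : List Int), l1.length = k →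
    ∀ p : Int, 0 ≤ p → p < 1000000007 →
    sylStep^[k] (PySem.Int.mod (p + 1) 1000000007)
      = (l1.foldl seqStep (p, PySem.Int.mod (p + 1) 1000000007)).2 := by
  induction k with
  | zero =>
    intro l1 h1 p _ _
    rw [List.length_eq_zero_iff.mp h1]
    rfl
  | succ k ih =>
    intro l1 h1 p hp0 hp1
    obtain ⟨x, t1, rfl⟩ := List.exists_cons_of_length_eq_add_one h1
    simp only [List.foldl_cons, Function.iterate_succ_apply]
    obtain ⟨hB, hA, hl, hr⟩ := key_step p hp0 hp1 x
    rw [hB, hA]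
    exact ih t1 (by simpa using h1) _ hl hr

lemma seq_eq_iterate (n : Int) : seq n = sylStep^[n.toNat] 2 := by
  unfold seq
  have h2 : (2 : Int) = PySem.Int.mod (1 + 1) 1000000007 := by decide
  rw [h2]
  rw [← main_inv n.toNat _ (by simp [PySem.List.length_pyRange_one]) 1 (by norm_num) (by norm_num)]

-- ---- B-side ----

lemma sylJump_eq_iterate (m : Nat) : ∀ a, sylJump m a = sylStep^[m] a := by
  induction m with
  | zero => intro a; rfl
  | succ m ih => intro a; rw [Function.iterate_succ_apply]; exact ih (sylStep a)

-- If the iteration repeats (f^[j+p] x = f^[j] x, p > 0) then from index j on it is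
-- periodic with period p, so any offset d can be reduced modulo p.
lemma iter_period (f : Int → Int) (x : Int) (j p : Nat) (hp : 0 < p)
    (h : f^[j + p] x = f^[j] x) : ∀ d : Nat, f^[j + d] x = f^[j + d % p] x := by
  intro d
  induction d using Nat.strong_induction_on with
  | _ d ih =>
    by_cases hd : d < p
    · rw [Nat.mod_eq_of_lt hd]
    · have hdp : p ≤ d := le_of_not_gt hd
      have e1 : j + d = (d - p) + (j + p) := by omega
      have e2 : (d - p) + j = j + (d - p) := by omega
      calc f^[j + d] x = f^[d - p] (f^[j + p] x) := by rw [e1, Function.iterate_add_apply]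
        _ = f^[d - p] (f^[j] x) := by rw [h]
        _ = f^[j + (d - p)] x := by rw [← Function.iterate_add_apply, e2]
        _ = f^[j + (d - p) % p] x := ih (d - p) (by omega)
        _ = f^[j + d % p] x := by
              have hm : (d - p) % p = d % p := by
                conv_rhs => rw [← Nat.sub_add_cancel hdp, Nat.add_mod_right]
              rw [hm]

-- dict invariant: every stored index i is a Nat ≤ k whose iterate is the key
def PosInv (pos : PySem.Dict Int Int) (k : Nat) : Prop :=
  ∀ v i, PySem.Dict.get? pos v = some i →
    ∃ j : Nat, i = (j : Int) ∧ j ≤ k ∧ sylStep^[j] 2 = v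

lemma go_eq (n : Int) : ∀ (rem kn : Nat) (pos : PySem.Dict Int Int),
    kn + rem = n.toNat → PosInv pos kn →
    seqAltGo n rem (sylStep^[kn] 2) (kn : Int) pos = sylStep^[n.toNat] 2 := by
  intro rem
  induction rem with
  | zero =>
    intro kn pos hk _
    have hkn : kn = n.toNat := by omega
    subst hkn
    simp [seqAltGo]
  | succ rem ih =>
    intro kn pos hk hinv
    have hn0 : 0 < n := by
      by_contra h
      push Not at h
      have := Int.toNat_of_nonpos h
      omega
    have hnn : (n.toNat : Int) = n := Int.toNat_of_nonneg (le_of_lt hn0)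
    have ha' : sylStep (sylStep^[kn] 2) = sylStep^[kn + 1] 2 :=
      (Function.iterate_succ_apply' sylStep kn 2).symm
    have hstep : ((kn : Int) + 1) = ((kn + 1 : Nat) : Int) := by push_cast; ring
    cases hcase : PySem.Dict.get? pos (sylStep (sylStep^[kn] 2)) with
    | none =>
      simp only [seqAltGo, hcase]
      rw [ha', hstep]
      apply ih (kn + 1)
      · omega
      · intro v i hgi
        by_cases hv : v = sylStep^[kn + 1] 2
        · subst hv
          rw [PySem.Dict.get?_insert_self] at hgi
          exact ⟨kn + 1, (Option.some.inj hgi).symm, le_refl _, rfl⟩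
        · rw [PySem.Dict.get?_insert_of_ne _ _ hv] at hgi
          obtain ⟨j, hj1, hj2, hj3⟩ := hinv v i hgi
          exact ⟨j, hj1, by omega, hj3⟩
    | some i =>
      simp only [seqAltGo, hcase]
      obtain ⟨j, rfl, hjk, hji⟩ := hinv _ i hcase
      rw [ha']
      rw [ha'] at hji
      -- period p = kn + 1 - j > 0
      have hplt : 0 < (kn + 1) - j := by omega
      have hper : sylStep^[j + ((kn + 1) - j)] 2 = sylStep^[j] 2 := by
        have he : j + ((kn + 1) - j) = kn + 1 := by omega
        rw [he, hji]
      -- the Int arithmetic of the jump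
      have hdiv : ((kn : Int) + 1 - (j : Int)) = (((kn + 1) - j : Nat) : Int) := by omega
      have hsub : n - ((kn : Int) + 1) = ((rem : Nat) : Int) := by omega
      have hmodc : PySem.Int.mod (n - ((kn : Int) + 1)) ((kn : Int) + 1 - (j : Int))
          = ((rem % ((kn + 1) - j) : Nat) : Int) := by
        rw [hsub, hdiv]
        exact PySem.Int.mod_natCast rem ((kn + 1) - j)
      rw [hmodc, Int.toNat_natCast, sylJump_eq_iterate]
      -- reduce the target index modulo the period
      set p : Nat := (kn + 1) - j with hpdef
      have hmain : sylStep^[kn + 1 + rem] 2 = sylStep^[kn + 1 + rem % p] 2 := by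
        have h1 : kn + 1 + rem = j + (p + rem) := by omega
        have h2 : sylStep^[j + (p + rem)] 2 = sylStep^[j + (p + rem) % p] 2 :=
          iter_period sylStep 2 j p hplt hper (p + rem)
        have h3 : (p + rem) % p = rem % p := by
          rw [Nat.add_comm, Nat.add_mod_right]
        calc sylStep^[kn + 1 + rem] 2 = sylStep^[j + (p + rem)] 2 := by rw [h1]
          _ = sylStep^[j + rem % p] 2 := by rw [h2, h3]
          _ = sylStep^[rem % p] (sylStep^[j] 2) := by rw [Nat.add_comm, Function.iterate_add_apply]
          _ = sylStep^[rem % p] (sylStep^[kn + 1] 2) := by rw [hji]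
          _ = sylStep^[kn + 1 + rem % p] 2 := by
                simp only [← Function.iterate_add_apply]
                congr 1
                omega
      have hfin : n.toNat = kn + 1 + rem := by omega
      rw [hfin, hmain]
      simp only [← Function.iterate_add_apply]
      congr 1
      omega

lemma seq_alt_eq_iterate (n : Int) : seq_alt n = sylStep^[n.toNat] 2 := by
  have hPos : PosInv (PySem.Dict.insert PySem.Dict.empty 2 0) 0 := by
    intro v i hgi
    by_cases hv : v = 2
    · subst hv
      rw [PySem.Dict.get?_insert_self] at hgi
      exact ⟨0, (Option.some.inj hgi).symm, le_refl _, rfl⟩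
    · rw [PySem.Dict.get?_insert_of_ne _ _ hv] at hgi
      simp [PySem.Dict.get?, PySem.Dict.empty] at hgi
  have h := go_eq n n.toNat 0 (PySem.Dict.insert PySem.Dict.empty 2 0) (by omega) hPos
  unfold seq_alt
  simpa using h

-- ===== VERDICT (by name: the statement is the Claim_ definition above) =====
theorem seq_spec : Claim_equal_seq := by
  intro n _
  show seq n = seq_alt n
  rw [seq_eq_iterate, seq_alt_eq_iterate]
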